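-- pv_equiv track=rewrite | github.com/nataliastas/Python_programming_easy_projects | pwjp01/zadanie1.py | liczenie_wielomianu
-- ===== SOURCE A (Python) =====
-- def liczenie_wielomianu(pierwiastek, wspolczynniki):
--     wynik_list = []
--     length = len(wspolczynniki)
--     for j in range(len(wspolczynniki)):
--         wynik = wspolczynniki[j] * (pierwiastek ** (length - 1))
--         length = length - 1
--         wynik_list.append(wynik)
--     return wynik_list
-- ===== SOURCE B (Python) =====
-- def liczenie_wielomianu(pierwiastek, wspolczynniki):
--     # pass 1: ascending powers [1, r, r^2, ...], one multiply each
--     potegi = []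
--     p = 1
--     for _ in wspolczynniki:
--         potegi.append(p)
--         p *= pierwiastek
--     # pass 2: pair highest power with first coefficient
--     return [w * q for w, q in zip(wspolczynniki, reversed(potegi))]
-- ===== Notes on version B (the rewrite author's own statement) =====
-- stated objective: faster
-- what changed: B first builds the ascending list of powers of the root with one multiplication per element, then zips the coefficients with that list reversed, instead of A's loop that recomputes pierwiastek**(length-1) from scratch at every index.
import Mathlib
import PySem

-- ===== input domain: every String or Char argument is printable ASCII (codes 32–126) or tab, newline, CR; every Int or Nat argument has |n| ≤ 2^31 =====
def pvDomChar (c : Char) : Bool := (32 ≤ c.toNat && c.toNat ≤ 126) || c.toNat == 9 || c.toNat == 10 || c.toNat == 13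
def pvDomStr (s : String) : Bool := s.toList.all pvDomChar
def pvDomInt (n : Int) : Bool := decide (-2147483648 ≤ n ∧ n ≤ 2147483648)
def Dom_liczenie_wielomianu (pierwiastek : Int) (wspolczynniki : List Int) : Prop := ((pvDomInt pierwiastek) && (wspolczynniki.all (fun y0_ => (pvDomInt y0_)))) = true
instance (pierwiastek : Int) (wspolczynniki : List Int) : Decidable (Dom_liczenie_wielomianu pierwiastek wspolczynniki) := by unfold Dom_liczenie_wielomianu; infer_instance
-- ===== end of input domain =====

-- B replaces A's per-term exponentiation pierwiastek**(length-1) with two staged passes: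
-- an ascending powers list built with one multiplication per element, then a zip-multiply
-- against the coefficients (objective: faster).

-- ===== PORT A =====
-- A's loop walks the coefficients in order, multiplying each by pierwiastek ** (length - 1)
-- with `length` decremented each step; the exponent length-1 equals the length of the tail,
-- so the loop over j / wspolczynniki[j] is transcribed as this structural walk carrying length.
def liczenie_wielomianu_go (pierwiastek : Int) : List Int → Nat → List Int
  | [], _ => []
  | c :: t, length => c * pierwiastek ^ (length - 1) :: liczenie_wielomianu_go pierwiastek t (length - 1)

def liczenie_wielomianu (pierwiastek : Int) (wspolczynniki : List Int) : List Int :=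
  liczenie_wielomianu_go pierwiastek wspolczynniki wspolczynniki.length

-- ===== PORT B =====
-- Source B pass 1: the ascending powers list [p, p*r, p*r^2, …] of the given count.
def pvPowersAsc (pierwiastek : Int) : Nat → Int → List Int
  | 0, _ => []
  | n + 1, p => p :: pvPowersAsc pierwiastek n (p * pierwiastek)

-- Source B pass 2: zip the coefficients with the reversed powers list, multiplying pairwise.
def liczenie_wielomianu_alt (pierwiastek : Int) (wspolczynniki : List Int) : List Int :=
  List.zipWith (fun w q => w * q) wspolczynniki (pvPowersAsc pierwiastek wspolczynniki.length 1).reverse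

-- ===== PRECONDITION & SPEC =====
def Spec_liczenie_wielomianu (pierwiastek : Int) (wspolczynniki : List Int) (out : List Int) : Prop := out = liczenie_wielomianu_alt pierwiastek wspolczynniki
instance (pierwiastek : Int) (wspolczynniki : List Int) (out : List Int) : Decidable (Spec_liczenie_wielomianu pierwiastek wspolczynniki out) := by unfold Spec_liczenie_wielomianu; infer_instance

-- ===== CLAIM (what is proved, stated in full; the proofs are below) =====
def Claim_equal_liczenie_wielomianu : Prop := ∀ (pierwiastek : Int) (wspolczynniki : List Int), Dom_liczenie_wielomianu pierwiastek wspolczynniki → Spec_liczenie_wielomianu pierwiastek wspolczynniki (liczenie_wielomianu pierwiastek wspolczynniki)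

-- ===== LEMMAS AND PROOFS =====
theorem pvPowersAsc_length (r : Int) : ∀ (n : Nat) (p : Int), (pvPowersAsc r n p).length = n := by
  intro n
  induction n with
  | zero => intro p; rfl
  | succ m ih => intro p; simp [pvPowersAsc, ih]

theorem pvPowersAsc_get (r : Int) : ∀ (n : Nat) (p : Int) (i : Nat) (h : i < (pvPowersAsc r n p).length),
    (pvPowersAsc r n p)[i] = p * r ^ i := by
  intro n
  induction n with
  | zero => intro p i h; simp [pvPowersAsc_length] at h
  | succ m ih =>
      intro p i h
      cases i with
      | zero => simp [pvPowersAsc]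
      | succ j =>
          have hj : j < (pvPowersAsc r m (p * r)).length := by
            simp [pvPowersAsc_length] at h ⊢; omega
          simp only [pvPowersAsc, List.getElem_cons_succ]
          rw [ih (p * r) j hj, pow_succ]
          ring

theorem go_length (r : Int) : ∀ (ws : List Int) (n : Nat),
    (liczenie_wielomianu_go r ws n).length = ws.length := by
  intro ws
  induction ws with
  | nil => intro n; rfl
  | cons c t ih => intro n; simp [liczenie_wielomianu_go, ih]

theorem go_get (r : Int) : ∀ (ws : List Int) (n : Nat) (i : Nat) (h : i < (liczenie_wielomianu_go r ws n).length),
    (liczenie_wielomianu_go r ws n)[i] = ws[i]'(by rwa [go_length] at h) * r ^ (n - 1 - i) := by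
  intro ws
  induction ws with
  | nil => intro n i h; simp [liczenie_wielomianu_go] at h
  | cons c t ih =>
      intro n i h
      cases i with
      | zero => simp [liczenie_wielomianu_go]
      | succ j =>
          have hj : j < (liczenie_wielomianu_go r t (n - 1)).length := by
            simp [go_length] at h ⊢; omega
          have he : n - 1 - 1 - j = n - 1 - (j + 1) := by omega
          simp only [liczenie_wielomianu_go, List.getElem_cons_succ, ih (n - 1) j hj, he]

theorem liczenie_eq (r : Int) (ws : List Int) :
    liczenie_wielomianu r ws = liczenie_wielomianu_alt r ws := by
  apply List.ext_getElem
  · simp [liczenie_wielomianu, liczenie_wielomianu_alt, go_length, pvPowersAsc_length]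
  · intro i h1 h2
    have hi : i < ws.length := by
      simpa [liczenie_wielomianu, go_length] using h1
    have hrev : i < (pvPowersAsc r ws.length 1).reverse.length := by
      simp [pvPowersAsc_length]; omega
    have hidx : (pvPowersAsc r ws.length 1).length - 1 - i < (pvPowersAsc r ws.length 1).length := by
      simp [pvPowersAsc_length]; omega
    simp only [liczenie_wielomianu, liczenie_wielomianu_alt, go_get, List.getElem_zipWith,
      List.getElem_reverse, pvPowersAsc_get, pvPowersAsc_length, one_mul]

-- ===== VERDICT (by name: the statement is the Claim_ definition above) =====
theorem liczenie_wielomianu_spec : Claim_equal_liczenie_wielomianu := by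
  intro r ws _
  unfold Spec_liczenie_wielomianu
  exact liczenie_eq r ws
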